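-- pv_equiv track=rewrite | github.com/TuAnh23/Perturbation-basedQE | read_and_analyse_df.py | changes_spread
-- ===== SOURCE A (Python) =====
-- def changes_spread(opcodes):
--     """
--     The longest distance between two changes
--     E.g., 111111111
--             x    x
--           112112121
--           longest distance is between the two marks
--     Args:
--         opcodes: the transformation to turn string a to string b
--
--     Returns:
--
--     """
--     start_change = -1
--     end_change = -1
--     for opcode in opcodes:
--         if opcode[0] != 'equal':
--             start_change = opcode[1]
--             break
--     for opcode in reversed(opcodes):
--         if opcode[0] != 'equal':
--             end_change = opcode[2]
--             break
--     return max(0, end_change - start_change)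
-- ===== SOURCE B (Python) =====
-- def changes_spread(opcodes):
--     first_start = None
--     last_end = 0
--     for opcode in opcodes:
--         if opcode[0] != 'equal':
--             if first_start is None:
--                 first_start = opcode[1]
--             last_end = opcode[2]
--     if first_start is None:
--         return 0
--     return max(0, last_end - first_start)
-- ===== Notes on version B (the rewrite author's own statement) =====
-- stated objective: alternative
-- what changed: Replaces A's two early-exit scans (forward for the first change start, reversed for the last change end) with one forward pass threading first_start/last_end state; no sentinel -1 values.
import Mathlib
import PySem

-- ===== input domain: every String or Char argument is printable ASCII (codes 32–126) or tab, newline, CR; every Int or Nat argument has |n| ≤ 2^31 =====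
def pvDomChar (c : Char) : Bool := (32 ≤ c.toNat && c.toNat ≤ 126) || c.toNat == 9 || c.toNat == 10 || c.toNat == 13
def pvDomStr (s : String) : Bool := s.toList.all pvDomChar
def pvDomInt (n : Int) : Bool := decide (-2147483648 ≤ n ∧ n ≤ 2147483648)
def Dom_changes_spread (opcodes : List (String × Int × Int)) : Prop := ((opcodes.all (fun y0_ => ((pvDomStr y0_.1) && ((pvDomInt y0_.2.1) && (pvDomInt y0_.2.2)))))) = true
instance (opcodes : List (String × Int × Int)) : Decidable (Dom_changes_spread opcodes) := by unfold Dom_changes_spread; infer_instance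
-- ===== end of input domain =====

-- B replaces A's two early-exit scans (forward and reversed) with one forward pass threading state; same cost, different decomposition.

-- ===== PORT A =====
-- first loop: forward scan, break at the first non-'equal' opcode (start_change stays -1 if none)
def pvAStart : List (String × Int × Int) → Int
  | [] => -1
  | (op, i, _) :: rest => if op == "equal" then pvAStart rest else i

-- second loop: scan over reversed(opcodes), break at the first non-'equal' opcode (end_change stays -1 if none)
def pvAEndLoop : List (String × Int × Int) → Int
  | [] => -1
  | (op, _, j) :: rest => if op == "equal" then pvAEndLoop rest else j

def changes_spread (opcodes : List (String × Int × Int)) : Int :=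
  max 0 (pvAEndLoop opcodes.reverse - pvAStart opcodes)

-- ===== PORT B =====
-- one forward loop carrying (first_start : Option Int, last_end : Int); the final return is the base case
def pvBLoop : List (String × Int × Int) → Option Int → Int → Int
  | [], first_start, last_end =>
      match first_start with
      | none => 0
      | some s => max 0 (last_end - s)
  | (op, i, j) :: rest, first_start, last_end =>
      if op == "equal" then pvBLoop rest first_start last_end
      else pvBLoop rest (match first_start with | none => some i | some s => some s) j

def changes_spread_alt (opcodes : List (String × Int × Int)) : Int :=
  pvBLoop opcodes none 0

-- ===== PRECONDITION & SPEC =====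
def Spec_changes_spread (opcodes : List (String × Int × Int)) (out : Int) : Prop := out = changes_spread_alt opcodes
instance (opcodes : List (String × Int × Int)) (out : Int) : Decidable (Spec_changes_spread opcodes out) := by unfold Spec_changes_spread; infer_instance

-- ===== CLAIM (what is proved, stated in full; the proofs are below) =====
def Claim_equal_changes_spread : Prop := ∀ (opcodes : List (String × Int × Int)), Dom_changes_spread opcodes → Spec_changes_spread opcodes (changes_spread opcodes)

-- ===== LEMMAS AND PROOFS =====

-- last non-'equal' opcode's third component, default d
def pvE : List (String × Int × Int) → Int → Int
  | [], d => d
  | (op, _, j) :: rest, d => if op == "equal" then pvE rest d else pvE rest j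

theorem pvAEndLoop_reverse_append (l r : List (String × Int × Int)) :
    pvAEndLoop (l.reverse ++ r) = pvE l (pvAEndLoop r) := by
  induction l generalizing r with
  | nil => simp [pvE]
  | cons x rest ih =>
    obtain ⟨op, i, j⟩ := x
    simp only [List.reverse_cons, List.append_assoc, List.cons_append, List.nil_append, ih,
      pvAEndLoop, pvE]
    by_cases h : op == "equal" <;> simp [h]

theorem pvBLoop_some (l : List (String × Int × Int)) (s le : Int) :
    pvBLoop l (some s) le = max 0 (pvE l le - s) := by
  induction l generalizing le with
  | nil => simp [pvBLoop, pvE]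
  | cons x rest ih =>
    obtain ⟨op, i, j⟩ := x
    by_cases h : op == "equal" <;> simp [pvBLoop, pvE, h, ih]

theorem pvBLoop_none (l : List (String × Int × Int)) :
    pvBLoop l none 0 = max 0 (pvE l (-1) - pvAStart l) := by
  induction l with
  | nil => simp [pvBLoop, pvE, pvAStart]
  | cons x rest ih =>
    obtain ⟨op, i, j⟩ := x
    by_cases h : op == "equal" <;>
      simp [pvBLoop, pvE, pvAStart, h, ih, pvBLoop_some]

-- ===== VERDICT (by name: the statement is the Claim_ definition above) =====
theorem changes_spread_spec : Claim_equal_changes_spread := by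
  intro opcodes _
  unfold Spec_changes_spread changes_spread changes_spread_alt
  rw [pvBLoop_none]
  have := pvAEndLoop_reverse_append opcodes []
  simp only [List.append_nil] at this
  rw [this]
  rfl
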